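-- pv_equiv track=rewrite | github.com/danyow-cheung/Algorithms_python | leetcode/greedy_2389.py | answerQueries_tle
-- ===== SOURCE A (Python) =====
-- def answerQueries_tle(queries,nums):
--     '''超时间'''
--     answer = [0] * len(queries)
--     nums.sort()
--     for i in range(len(queries)):
--         for j in range(len(nums)):
--             if sum(nums[:j + 1]) <= queries[i]:
--                 answer[i] = j + 1
--     return answer
-- ===== SOURCE B (Python) =====
-- def answerQueries_tle(queries, nums):
--     '''超时间'''
--     # Sort + prefix sums + suffix minima + binary search per query.
--     # (Sorts nums in place, exactly as the original does.)
--     nums.sort()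
--     prefix = []
--     s = 0
--     for x in nums:
--         s += x
--         prefix.append(s)
--     # sm[j] = min(prefix[j:]) : nondecreasing, and the answer for q is the
--     # number of positions j with sm[j] <= q (= largest j+1 with prefix[j] <= q).
--     sm = []
--     cur = None
--     for v in reversed(prefix):
--         cur = v if cur is None else min(cur, v)
--         sm.append(cur)
--     sm.reverse()
--     res = []
--     for q in queries:
--         lo, hi = 0, len(sm)
--         while lo < hi:
--             mid = (lo + hi) // 2
--             if sm[mid] <= q:
--                 lo = mid + 1
--             else:
--                 hi = mid
--         res.append(lo)
--     return res
-- ===== Notes on version B (the rewrite author's own statement) =====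
-- stated objective: faster
-- what changed: Replaced the per-query quadratic scan (recomputing sum(nums[:j+1]) for every j) by one pass building prefix sums and their suffix minima, then a hand-written binary search per query over the nondecreasing suffix-minima array.
import Mathlib
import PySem

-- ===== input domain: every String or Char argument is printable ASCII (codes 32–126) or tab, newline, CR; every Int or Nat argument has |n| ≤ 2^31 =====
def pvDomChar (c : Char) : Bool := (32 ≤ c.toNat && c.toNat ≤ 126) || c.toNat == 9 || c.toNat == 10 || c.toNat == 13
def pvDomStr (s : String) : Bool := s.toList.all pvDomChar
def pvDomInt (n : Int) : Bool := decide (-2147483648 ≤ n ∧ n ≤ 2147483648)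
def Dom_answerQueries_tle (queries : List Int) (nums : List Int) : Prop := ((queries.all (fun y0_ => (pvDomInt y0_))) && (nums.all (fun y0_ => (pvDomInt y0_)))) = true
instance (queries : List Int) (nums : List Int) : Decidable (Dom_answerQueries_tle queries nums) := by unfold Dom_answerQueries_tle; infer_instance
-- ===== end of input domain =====

-- B replaces A's per-query rescans by prefix sums + suffix minima + a binary search per
-- query. Both Pythons sort nums in place; the equivalence proved is about the return value.


-- ===== PORT A =====
-- 'nums.sort()' = PySem.List.sorted; 'sum(nums[:j+1])' : a slice with nonnegative upper
-- bound j+1 ≥ 1 is exactly List.take (j+1); 'queries[i]' with 0 ≤ i < len is getD i 0.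
def answerQueries_tle (queries : List Int) (nums : List Int) : List Int :=
  let ns := PySem.List.sorted nums (fun x => x) false
  (List.range queries.length).foldl (fun ans i =>
      (List.range ns.length).foldl (fun ans2 j =>
          if (ns.take (j + 1)).sum ≤ queries.getD i 0 then ans2.set i ((j : Int) + 1) else ans2)
        ans)
    (List.replicate queries.length (0 : Int))

-- ===== PORT B =====
-- hand-written binary search loop from Source B: while lo < hi: mid = (lo+hi)//2; …
-- (structural recursion on the fuel hi - lo, which bounds the iteration count;
--  lo, hi are nonnegative, so Nat division (lo+hi)/2 is exactly Python's //)
def bsGo (sm : List Int) (q : Int) : Nat → Nat → Nat → Nat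
  | 0, lo, _ => lo
  | fuel + 1, lo, hi =>
    if lo < hi then
      let mid := (lo + hi) / 2
      if sm.getD mid 0 ≤ q then bsGo sm q fuel (mid + 1) hi else bsGo sm q fuel lo mid
    else lo

def bsLoop (sm : List Int) (q : Int) (lo hi : Nat) : Nat :=
  bsGo sm q (hi - lo) lo hi

def answerQueries_tle_alt (queries : List Int) (nums : List Int) : List Int :=
  let ns := PySem.List.sorted nums (fun x => x) false
  -- prefix sums, built by one appending pass
  let pr := (ns.foldl (fun (acc : Int × List Int) x => (acc.1 + x, acc.2 ++ [acc.1 + x]))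
      ((0 : Int), ([] : List Int))).2
  -- suffix minima: scan reversed(pr) keeping the running min, then reverse
  let sm := ((pr.reverse.foldl (fun (acc : Option Int × List Int) v =>
        let cur := match acc.1 with | none => v | some c => min c v
        (some cur, acc.2 ++ [cur])) ((none : Option Int), ([] : List Int))).2).reverse
  queries.foldl (fun res q => res ++ [((bsLoop sm q 0 sm.length : Nat) : Int)]) []

-- ===== PRECONDITION & SPEC =====
def Spec_answerQueries_tle (queries : List Int) (nums : List Int) (out : List Int) : Prop := out = answerQueries_tle_alt queries nums
instance (queries : List Int) (nums : List Int) (out : List Int) : Decidable (Spec_answerQueries_tle queries nums out) := by unfold Spec_answerQueries_tle; infer_instance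

-- ===== CLAIM (what is proved, stated in full; the proofs are below) =====
def Claim_equal_answerQueries_tle : Prop := ∀ (queries : List Int) (nums : List Int), Dom_answerQueries_tle queries nums → Spec_answerQueries_tle queries nums (answerQueries_tle queries nums)

-- ===== LEMMAS AND PROOFS =====

-- the mathematical value of B's prefix-sum pass
def prefixOf (ns : List Int) : List Int :=
  (List.range ns.length).map (fun j => (ns.take (j + 1)).sum)

-- running minimum
def runMin (c : Int) (l : List Int) : Int := l.foldl min c

-- B's suffix-minima pass, as a function of the prefix list
def sufMins (pr : List Int) : List Int :=
  ((pr.reverse.foldl (fun (acc : Option Int × List Int) v =>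
      let cur := match acc.1 with | none => v | some c => min c v
      (some cur, acc.2 ++ [cur])) ((none : Option Int), ([] : List Int))).2).reverse

-- A's inner loop as a scalar fold
def innerS (ns : List Int) (q : Int) : Int :=
  (List.range ns.length).foldl
    (fun a j => if (ns.take (j + 1)).sum ≤ q then (j : Int) + 1 else a) 0

-- Bool form of "some prefix with index ≥ j fits under q"
def anyLe (pr : List Int) (q : Int) (n j : Nat) : Bool :=
  (List.range n).any (fun k => decide (j ≤ k) && decide (pr.getD k 0 ≤ q))

theorem pr_fold_eq (l : List Int) : ∀ (s : Int) (acc : List Int),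
    (l.foldl (fun acc x => (acc.1 + x, acc.2 ++ [acc.1 + x])) (s, acc)).2
      = acc ++ (List.range l.length).map (fun j => s + (l.take (j + 1)).sum) := by
  induction l with
  | nil => intro s acc; simp
  | cons x xs ih =>
    intro s acc
    simp only [List.foldl_cons]
    rw [ih]
    rw [List.length_cons, List.range_succ_eq_map]
    simp [List.map_map, Function.comp, List.take_succ_cons, add_assoc]

theorem pr_eq (ns : List Int) :
    (ns.foldl (fun (acc : Int × List Int) x => (acc.1 + x, acc.2 ++ [acc.1 + x]))
      ((0 : Int), ([] : List Int))).2 = prefixOf ns := by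
  rw [pr_fold_eq]
  simp [prefixOf]

theorem sm_fold_eq (l : List Int) : ∀ (c : Int) (acc : List Int),
    (l.foldl (fun (acc : Option Int × List Int) v =>
        let cur := match acc.1 with | none => v | some c => min c v
        (some cur, acc.2 ++ [cur])) (some c, acc)).2
      = acc ++ (List.range l.length).map (fun t => runMin c (l.take (t + 1))) := by
  induction l with
  | nil => intro c acc; simp
  | cons v vs ih =>
    intro c acc
    simp only [List.foldl_cons]
    rw [ih]
    rw [List.length_cons, List.range_succ_eq_map]
    simp [runMin, List.map_map, Function.comp, List.take_succ_cons]

theorem sufMins_of_rev (pr : List Int) (x : Int) (r : List Int) (h : pr.reverse = x :: r) :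
    sufMins pr = ((List.range (r.length + 1)).map (fun t => runMin x (r.take t))).reverse := by
  unfold sufMins
  rw [h]
  simp only [List.foldl_cons]
  rw [sm_fold_eq]
  rw [List.range_succ_eq_map]
  simp [runMin, List.map_map, Function.comp]

theorem sufMins_length (pr : List Int) : (sufMins pr).length = pr.length := by
  cases h : pr.reverse with
  | nil =>
    have : pr = [] := by simpa using congrArg List.reverse h
    subst this
    simp [sufMins]
  | cons x r =>
    rw [sufMins_of_rev pr x r h]
    have : pr.length = pr.reverse.length := by simp
    rw [this, h]
    simp

theorem runMin_le_iff (l : List Int) : ∀ (c q : Int),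
    runMin c l ≤ q ↔ c ≤ q ∨ ∃ v ∈ l, v ≤ q := by
  induction l with
  | nil => intro c q; simp [runMin]
  | cons v vs ih =>
    intro c q
    have : runMin c (v :: vs) = runMin (min c v) vs := by simp [runMin]
    rw [this, ih]
    simp [or_assoc]

theorem exists_mem_drop_iff (pr : List Int) (j : Nat) (q : Int) :
    (∃ v ∈ pr.drop j, v ≤ q) ↔ ∃ k, j ≤ k ∧ k < pr.length ∧ pr.getD k 0 ≤ q := by
  constructor
  · rintro ⟨v, hv, hle⟩
    obtain ⟨t, ht, rfl⟩ := List.getElem_of_mem hv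
    refine ⟨j + t, by omega, ?_, ?_⟩
    · have := ht; simp [List.length_drop] at this; omega
    · rw [List.getD_eq_getElem?_getD]
      have hlt : j + t < pr.length := by have := ht; simp [List.length_drop] at this; omega
      rw [List.getElem?_eq_getElem hlt]
      simpa [List.getElem_drop] using hle
  · rintro ⟨k, hjk, hk, hle⟩
    refine ⟨pr[k], ?_, ?_⟩
    · rw [List.mem_iff_getElem]
      refine ⟨k - j, by simp [List.length_drop]; omega, ?_⟩
      rw [List.getElem_drop]
      congr 1
      omega
    · rw [List.getD_eq_getElem?_getD, List.getElem?_eq_getElem hk] at hle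
      simpa using hle

theorem sufMins_le_iff (pr : List Int) (j : Nat) (q : Int) (hj : j < pr.length) :
    ((sufMins pr).getD j 0 ≤ q) ↔ ∃ k, j ≤ k ∧ k < pr.length ∧ pr.getD k 0 ≤ q := by
  obtain ⟨x, r, hrev⟩ : ∃ x r, pr.reverse = x :: r := by
    cases h : pr.reverse with
    | nil =>
      exfalso
      have : pr = [] := by simpa using congrArg List.reverse h
      subst this; simp at hj
    | cons x r => exact ⟨x, r, rfl⟩
  have hlen : pr.length = r.length + 1 := by
    have : pr.length = pr.reverse.length := by simp
    rw [this, hrev]; simp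
  have hgd : (sufMins pr).getD j 0 = runMin x (r.take (r.length - j)) := by
    rw [sufMins_of_rev pr x r hrev]
    have hjM : j < ((List.range (r.length + 1)).map (fun t => runMin x (r.take t))).reverse.length := by
      simp; omega
    rw [List.getD_eq_getElem?_getD, List.getElem?_eq_getElem hjM]
    simp only [Option.getD_some]
    rw [List.getElem_reverse]
    simp only [List.getElem_map, List.getElem_range, List.length_map, List.length_range]
    try congr 2
    try omega
  rw [hgd, ← exists_mem_drop_iff, runMin_le_iff]
  have hpr : pr = r.reverse ++ [x] := by
    have := congrArg List.reverse hrev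
    simpa using this
  rw [hpr]
  have hjr : j ≤ r.length := by omega
  rw [List.drop_append_of_le_length (by simp; omega)]
  have hdt : r.reverse.drop j = (r.take (r.length - j)).reverse := by
    rw [List.reverse_take]
    congr 1
    omega
  rw [hdt]
  constructor
  · rintro (hx | ⟨v, hv, hle⟩)
    · exact ⟨x, by simp, hx⟩
    · exact ⟨v, by simp [List.mem_reverse]; left; exact hv, hle⟩
  · rintro ⟨v, hv, hle⟩
    simp only [List.mem_append, List.mem_reverse, List.mem_singleton] at hv
    rcases hv with hv | rfl
    · exact Or.inr ⟨v, hv, hle⟩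
    · exact Or.inl hle

theorem countLt : ∀ (n lo : Nat), lo ≤ n →
    (List.range n).countP (fun j => decide (j < lo)) = lo := by
  intro n
  induction n with
  | zero => intro lo h; interval_cases lo; simp
  | succ n ih =>
    intro lo h
    by_cases hl : lo ≤ n
    · rw [List.range_succ, List.countP_append, ih lo hl]
      simp [Nat.not_lt.mpr hl]
    · have : lo = n + 1 := by omega
      subst this
      rw [List.countP_eq_length.mpr]
      · simp
      · intro a ha
        simp [List.mem_range] at ha
        simpa using ha

theorem foldA_count (pr : List Int) (q : Int) : ∀ n : Nat,
    ((List.range n).foldl (fun a j => if pr.getD j 0 ≤ q then (j : Int) + 1 else a) 0)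
      = (((List.range n).countP (fun j => anyLe pr q n j) : Nat) : Int) := by
  intro n
  induction n with
  | zero => simp
  | succ n ih =>
    rw [List.range_succ, List.foldl_append]
    simp only [List.foldl_cons, List.foldl_nil]
    by_cases h : pr.getD n 0 ≤ q
    · rw [if_pos h]
      have hall : (List.range (n + 1)).countP (fun j => anyLe pr q (n + 1) j)
          = (List.range (n + 1)).length := by
        rw [List.countP_eq_length]
        intro j hj
        simp only [List.mem_range] at hj
        simp only [anyLe, List.any_eq_true]
        refine ⟨n, by simp, ?_⟩
        simp only [Bool.and_eq_true, decide_eq_true_iff]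
        exact ⟨by omega, h⟩
      rw [← List.range_succ, hall]
      simp
    · rw [if_neg h, ih]
      have h2 : List.countP (fun j => anyLe pr q (n + 1) j) [n] = 0 := by
        simp only [List.countP_cons, List.countP_nil]
        have : anyLe pr q (n + 1) n = false := by
          simp only [anyLe, List.any_eq_false]
          intro k hk
          simp only [List.mem_range] at hk
          simp only [Bool.and_eq_true, decide_eq_true_iff, not_and]
          intro hnk
          have : k = n := by omega
          subst this
          exact h
        simp [this]
      have h3 : (List.range n).countP (fun j => anyLe pr q (n + 1) j)
          = (List.range n).countP (fun j => anyLe pr q n j) := by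
        apply List.countP_congr
        intro j hj
        simp only [List.mem_range] at hj
        simp only [anyLe, List.any_eq_true]
        constructor
        · rintro ⟨k, hk, hprop⟩
          simp only [List.mem_range] at hk
          simp only [Bool.and_eq_true, decide_eq_true_iff] at hprop
          refine ⟨k, ?_, by simp only [Bool.and_eq_true, decide_eq_true_iff]; exact hprop⟩
          simp only [List.mem_range]
          rcases Nat.lt_or_ge k n with h' | h'
          · exact h'
          · exfalso; have : k = n := by omega
            subst this; exact h hprop.2
        · rintro ⟨k, hk, hprop⟩
          simp only [List.mem_range] at hk
          exact ⟨k, by simp [List.mem_range]; omega, hprop⟩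
      rw [List.countP_append, h2, h3]
      simp

theorem bs_base (sm : List Int) (q : Int) (lo : Nat) (hlo : lo ≤ sm.length)
    (hlow : ∀ i, i < lo → sm.getD i 0 ≤ q)
    (hhigh : ∀ i, lo ≤ i → i < sm.length → ¬ sm.getD i 0 ≤ q) :
    (List.range sm.length).countP (fun j => decide (sm.getD j 0 ≤ q)) = lo := by
  rw [List.countP_congr (q := fun j => decide (j < lo)) ?_]
  · exact countLt sm.length lo hlo
  · intro j hj
    simp only [List.mem_range] at hj
    simp only [decide_eq_true_iff]
    constructor
    · intro hP
      by_contra hge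
      exact hhigh j (by omega) hj hP
    · intro hlt
      exact hlow j hlt

theorem bs_main (sm : List Int) (q : Int)
    (mono : ∀ i j : Nat, i ≤ j → j < sm.length → sm.getD j 0 ≤ q → sm.getD i 0 ≤ q) :
    ∀ (d lo hi : Nat), hi - lo ≤ d → lo ≤ hi → hi ≤ sm.length →
      (∀ i, i < lo → sm.getD i 0 ≤ q) →
      (∀ i, hi ≤ i → i < sm.length → ¬ sm.getD i 0 ≤ q) →
      bsGo sm q d lo hi = (List.range sm.length).countP (fun j => decide (sm.getD j 0 ≤ q)) := by
  intro d
  induction d with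
  | zero =>
    intro lo hi hd hlh hhn hlow hhigh
    have heq : lo = hi := by omega
    subst heq
    simp only [bsGo]
    exact (bs_base sm q lo hhn hlow hhigh).symm
  | succ d ih =>
    intro lo hi hd hlh hhn hlow hhigh
    by_cases hlt : lo < hi
    · simp only [bsGo, hlt, if_true]
      have hmid1 : lo ≤ (lo + hi) / 2 := by omega
      have hmid2 : (lo + hi) / 2 < hi := by omega
      by_cases hm : sm.getD ((lo + hi) / 2) 0 ≤ q
      · rw [if_pos hm]
        apply ih ((lo + hi) / 2 + 1) hi (by omega) (by omega) hhn
        · intro i hi'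
          exact mono i ((lo + hi) / 2) (by omega) (by omega) hm
        · exact hhigh
      · rw [if_neg hm]
        apply ih lo ((lo + hi) / 2) (by omega) (by omega) (by omega) hlow
        · intro i hi1 hi2 hP
          exact hm (mono ((lo + hi) / 2) i hi1 hi2 hP)
    · have heq : lo = hi := by omega
      subst heq
      simp only [bsGo, lt_self_iff_false, if_false]
      exact (bs_base sm q lo hhn hlow hhigh).symm

theorem inner_length (C : Nat → Prop) [DecidablePred C] (F : Nat → Int) (i : Nat) :
    ∀ (l : List Nat) (ans : List Int),
      (l.foldl (fun a j => if C j then a.set i (F j) else a) ans).length = ans.length := by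
  intro l
  induction l with
  | nil => intro ans; simp
  | cons j l ih =>
    intro ans
    simp only [List.foldl_cons]
    rw [ih]
    split <;> simp

theorem inner_getD_ne (C : Nat → Prop) [DecidablePred C] (F : Nat → Int) (i : Nat) :
    ∀ (l : List Nat) (ans : List Int) (k : Nat), k ≠ i →
      (l.foldl (fun a j => if C j then a.set i (F j) else a) ans).getD k 0 = ans.getD k 0 := by
  intro l
  induction l with
  | nil => intro ans k _; simp
  | cons j l ih =>
    intro ans k hk
    simp only [List.foldl_cons]
    rw [ih _ _ hk]
    split
    · rw [List.getD_eq_getElem?_getD, List.getElem?_set_ne (by omega), ← List.getD_eq_getElem?_getD]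
    · rfl

theorem inner_getD_eq (C : Nat → Prop) [DecidablePred C] (F : Nat → Int) (i : Nat) :
    ∀ (l : List Nat) (ans : List Int), i < ans.length →
      (l.foldl (fun a j => if C j then a.set i (F j) else a) ans).getD i 0
        = l.foldl (fun (a : Int) j => if C j then F j else a) (ans.getD i 0) := by
  intro l
  induction l with
  | nil => intro ans _; simp
  | cons j l ih =>
    intro ans hi
    simp only [List.foldl_cons]
    by_cases hc : C j
    · rw [if_pos hc, if_pos hc, ih _ (by simpa using hi)]
      congr 1
      rw [List.getD_eq_getElem?_getD, List.getElem?_set_self hi]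
      rfl
    · rw [if_neg hc, if_neg hc, ih _ hi]

theorem outer_length (queries ns : List Int) :
    ∀ (l : List Nat) (ans : List Int),
      (l.foldl (fun ans i => (List.range ns.length).foldl
          (fun a j => if (ns.take (j + 1)).sum ≤ queries.getD i 0 then a.set i ((j : Int) + 1) else a)
          ans) ans).length = ans.length := by
  intro l
  induction l with
  | nil => intro ans; simp
  | cons i l ih =>
    intro ans
    simp only [List.foldl_cons]
    rw [ih]
    exact inner_length (fun j => (ns.take (j + 1)).sum ≤ queries.getD i 0) (fun j => (j : Int) + 1) i _ ans

theorem outer_getD (queries ns : List Int) :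
    ∀ (l : List Nat) (ans : List Int), l.Nodup → (∀ i ∈ l, i < ans.length) → ∀ k : Nat,
      (l.foldl (fun ans i => (List.range ns.length).foldl
          (fun a j => if (ns.take (j + 1)).sum ≤ queries.getD i 0 then a.set i ((j : Int) + 1) else a)
          ans) ans).getD k 0
        = if k ∈ l then
            (List.range ns.length).foldl
              (fun (a : Int) j => if (ns.take (j + 1)).sum ≤ queries.getD k 0 then (j : Int) + 1 else a)
              (ans.getD k 0)
          else ans.getD k 0 := by
  intro l
  induction l with
  | nil => intro ans _ _ k; simp
  | cons i l ih =>
    intro ans hnd hlen k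
    simp only [List.foldl_cons]
    have hlen' : ∀ i' ∈ l, i' <
        ((List.range ns.length).foldl
          (fun a j => if (ns.take (j + 1)).sum ≤ queries.getD i 0 then a.set i ((j : Int) + 1) else a)
          ans).length := by
      intro i' hi'
      rw [inner_length (fun j => (ns.take (j + 1)).sum ≤ queries.getD i 0) (fun j => (j : Int) + 1) i]
      exact hlen i' (by simp [hi'])
    rw [ih _ (List.nodup_cons.mp hnd).2 hlen' k]
    by_cases hk : k = i
    · subst hk
      have hknl : k ∉ l := (List.nodup_cons.mp hnd).1
      rw [if_neg hknl, if_pos (by simp)]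
      exact inner_getD_eq (fun j => (ns.take (j + 1)).sum ≤ queries.getD k 0)
        (fun j => (j : Int) + 1) k _ ans (hlen k (by simp))
    · have : ((List.range ns.length).foldl
          (fun a j => if (ns.take (j + 1)).sum ≤ queries.getD i 0 then a.set i ((j : Int) + 1) else a)
          ans).getD k 0 = ans.getD k 0 :=
        inner_getD_ne (fun j => (ns.take (j + 1)).sum ≤ queries.getD i 0)
          (fun j => (j : Int) + 1) i _ ans k hk
      rw [this]
      simp [List.mem_cons, hk]

theorem perQuery (ns : List Int) (q : Int) :
    innerS ns q
      = ((bsLoop (sufMins (prefixOf ns)) q 0 (sufMins (prefixOf ns)).length : Nat) : Int) := by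
  set pr := prefixOf ns with hpr
  have hlen : pr.length = ns.length := by simp [hpr, prefixOf]
  have hsmlen : (sufMins pr).length = pr.length := sufMins_length pr
  have h1 : innerS ns q
      = (List.range pr.length).foldl (fun a j => if pr.getD j 0 ≤ q then (j : Int) + 1 else a) 0 := by
    unfold innerS
    rw [hlen]
    apply PySem.List.foldl_congr_mem
    intro acc j hj
    simp only [List.mem_range] at hj
    have : pr.getD j 0 = (ns.take (j + 1)).sum := by
      rw [hpr]
      exact PySem.List.getD_map_range (fun j => (ns.take (j + 1)).sum) ns.length j 0 hj
    rw [this]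
  have mono : ∀ i j : Nat, i ≤ j → j < (sufMins pr).length →
      (sufMins pr).getD j 0 ≤ q → (sufMins pr).getD i 0 ≤ q := by
    intro i j hij hj hle
    have hj' : j < pr.length := by omega
    obtain ⟨k, hk1, hk2, hk3⟩ := (sufMins_le_iff pr j q hj').mp hle
    exact (sufMins_le_iff pr i q (by omega)).mpr ⟨k, by omega, hk2, hk3⟩
  have h4 : bsLoop (sufMins pr) q 0 (sufMins pr).length
      = (List.range (sufMins pr).length).countP (fun j => decide ((sufMins pr).getD j 0 ≤ q)) :=
    bs_main (sufMins pr) q mono ((sufMins pr).length - 0) 0 (sufMins pr).length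
      (by omega) (by omega) (by omega) (by omega) (fun i hi1 hi2 => absurd hi1 (by omega))
  have h3 : (List.range pr.length).countP (fun j => anyLe pr q pr.length j)
      = (List.range (sufMins pr).length).countP (fun j => decide ((sufMins pr).getD j 0 ≤ q)) := by
    rw [hsmlen]
    apply List.countP_congr
    intro j hj
    simp only [List.mem_range] at hj
    simp only [anyLe, List.any_eq_true, decide_eq_true_iff]
    rw [sufMins_le_iff pr j q hj]
    constructor
    · rintro ⟨k, hk, hprop⟩
      simp only [List.mem_range] at hk
      simp only [Bool.and_eq_true, decide_eq_true_iff] at hprop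
      exact ⟨k, hprop.1, hk, hprop.2⟩
    · rintro ⟨k, hk1, hk2, hk3⟩
      refine ⟨k, by simp [List.mem_range]; omega, ?_⟩
      simp only [Bool.and_eq_true, decide_eq_true_iff]
      exact ⟨hk1, hk3⟩
  rw [h1, foldA_count pr q pr.length, h3, ← h4]

theorem alt_eq_map (queries nums : List Int) :
    answerQueries_tle_alt queries nums
      = queries.map (fun q =>
          ((bsLoop (sufMins (prefixOf (PySem.List.sorted nums (fun x => x) false))) q 0
            (sufMins (prefixOf (PySem.List.sorted nums (fun x => x) false))).length : Nat) : Int)) := by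
  have h0 : answerQueries_tle_alt queries nums
      = queries.foldl (fun res q => res ++
          [((bsLoop (sufMins ((PySem.List.sorted nums (fun x => x) false).foldl
              (fun (acc : Int × List Int) x => (acc.1 + x, acc.2 ++ [acc.1 + x]))
              ((0 : Int), ([] : List Int))).2) q 0
            (sufMins ((PySem.List.sorted nums (fun x => x) false).foldl
              (fun (acc : Int × List Int) x => (acc.1 + x, acc.2 ++ [acc.1 + x]))
              ((0 : Int), ([] : List Int))).2).length : Nat) : Int)]) [] := rfl
  rw [h0, pr_eq]
  rw [PySem.List.foldl_append_singleton_eq_map]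
  simp

-- ===== VERDICT (by name: the statement is the Claim_ definition above) =====
theorem answerQueries_tle_spec : Claim_equal_answerQueries_tle := by
  intro queries nums _hdom
  show answerQueries_tle queries nums = answerQueries_tle_alt queries nums
  rw [alt_eq_map]
  set ns := PySem.List.sorted nums (fun x => x) false with hns
  have hA : answerQueries_tle queries nums
      = (List.range queries.length).foldl (fun ans i =>
          (List.range ns.length).foldl (fun ans2 j =>
              if (ns.take (j + 1)).sum ≤ queries.getD i 0 then ans2.set i ((j : Int) + 1) else ans2)
            ans)
        (List.replicate queries.length (0 : Int)) := rfl
  rw [hA]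
  apply List.ext_getElem
  · rw [outer_length queries ns]
    simp
  · intro i hi hi'
    have hiL : i < queries.length := by
      simpa using hi'
    have hAlen : ((List.range queries.length).foldl (fun ans i =>
          (List.range ns.length).foldl (fun ans2 j =>
              if (ns.take (j + 1)).sum ≤ queries.getD i 0 then ans2.set i ((j : Int) + 1) else ans2)
            ans)
        (List.replicate queries.length (0 : Int))).length = queries.length := by
      rw [outer_length queries ns]; simp
    have hgd : ∀ (l : List Int) (k : Nat) (h : k < l.length), l[k] = l.getD k 0 := by
      intro l k h
      rw [List.getD_eq_getElem?_getD, List.getElem?_eq_getElem h]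
      rfl
    rw [hgd _ i hi]
    rw [outer_getD queries ns (List.range queries.length) _ (List.nodup_range)
      (by intro i' hi'2; simp [List.mem_range] at hi'2; simp [hi'2]) i]
    rw [if_pos (by simp [List.mem_range, hiL])]
    rw [List.getD_replicate _ hiL]
    have : (List.range ns.length).foldl
        (fun (a : Int) j => if (ns.take (j + 1)).sum ≤ queries.getD i 0 then (j : Int) + 1 else a) 0
        = innerS ns (queries.getD i 0) := rfl
    rw [this, perQuery]
    rw [List.getElem_map]
    congr 2
    rw [hgd queries i hiL]
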